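-- pv_equiv track=rewrite | github.com/DiTEC-project/semantic-association-rule-learning | semantic_rule_learning/src/util/converter_util.py | timeseries_to_transactions
-- ===== SOURCE A (Python) =====
-- from collections import defaultdict
--
-- def timeseries_to_transactions(sensor_data):
--     """
--     Convert timescaledb output to transactions that can be processed by an ARM algorithm
--     :param sensor_data: in the form of timescaledb objects
--     :return: list of transactions, list of sensor ids for items in the transactions
--     """
--     # group sensor data based on timestamp
--     groups = defaultdict(list)
--     transaction_list = []
--     for item in sensor_data:
--         if item[1] is None or item[2] is None:
--             continue
--         groups[item[0]].append(item)
--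
--     # add items with the same timestamp in the same list
--     for timestamp in groups:
--         measurement_list = []
--         for measurement in groups[timestamp]:
--             measurement_list.append(str(measurement[1]) + "_" + measurement[2])
--         transaction_list.append(measurement_list)
--
--     return transaction_list
-- ===== SOURCE B (Python) =====
-- def timeseries_to_transactions(sensor_data):
--     """Single-pass grouping: dict maps timestamp -> position of its transaction."""
--     transaction_list = []
--     index = {}
--     for item in sensor_data:
--         if item[1] is None or item[2] is None:
--             continue
--         i = index.get(item[0])
--         if i is None:
--             index[item[0]] = len(transaction_list)
--             transaction_list.append([str(item[1]) + "_" + item[2]])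
--         else:
--             transaction_list[i].append(str(item[1]) + "_" + item[2])
--     return transaction_list
-- ===== Notes on version B (the rewrite author's own statement) =====
-- stated objective: alternative
-- what changed: Replaces A's two passes (group full tuples into a defaultdict, then a second formatting pass over the groups) with a single scan that keeps only a timestamp->position dict and appends each formatted measurement directly into its transaction list.
import Mathlib
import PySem

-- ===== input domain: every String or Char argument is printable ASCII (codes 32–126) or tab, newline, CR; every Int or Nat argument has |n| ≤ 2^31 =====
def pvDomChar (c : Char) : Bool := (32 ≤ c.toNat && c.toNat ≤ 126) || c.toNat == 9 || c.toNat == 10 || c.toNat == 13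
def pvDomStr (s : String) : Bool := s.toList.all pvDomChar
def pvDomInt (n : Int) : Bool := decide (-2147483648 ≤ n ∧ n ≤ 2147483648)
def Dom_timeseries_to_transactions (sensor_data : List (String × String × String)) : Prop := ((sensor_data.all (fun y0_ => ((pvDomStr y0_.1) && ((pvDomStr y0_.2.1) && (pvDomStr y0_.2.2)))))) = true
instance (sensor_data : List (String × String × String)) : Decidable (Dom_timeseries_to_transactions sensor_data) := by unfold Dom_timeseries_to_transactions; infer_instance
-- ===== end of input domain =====

-- B replaces A's two passes (group all tuples into a defaultdict, then format each group)
-- by a single pass that keeps only a timestamp -> output-position dict and builds the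
-- formatted transaction lists directly (objective: alternative single-pass decomposition).
-- Under the type convention item[1]/item[2] are String and never None, so A's
-- 'continue' branch (and B's None guard) is unreachable and is not ported.

-- ===== PORT A =====
def timeseries_to_transactions (sensor_data : List (String × String × String)) : List (List String) :=
  -- groups = defaultdict(list); for item in sensor_data: groups[item[0]].append(item)
  let groups : PySem.Dict String (List (String × String × String)) :=
    sensor_data.foldl (fun g item => g.modify item.1 [] (fun l => l ++ [item])) PySem.Dict.empty
  -- for timestamp in groups: build measurement_list, append to transaction_list
  groups.keys.foldl (fun transaction_list timestamp =>
    transaction_list ++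
      [(groups.getD timestamp []).foldl
        (fun measurement_list measurement =>
          measurement_list ++ [measurement.2.1 ++ "_" ++ measurement.2.2]) []]) []

-- ===== PORT B =====
def timeseries_to_transactions_alt (sensor_data : List (String × String × String)) : List (List String) :=
  (sensor_data.foldl
    (fun (st : PySem.Dict String Nat × List (List String)) item =>
      match st.1.get? item.1 with
      | none => (st.1.insert item.1 st.2.length, st.2 ++ [[item.2.1 ++ "_" ++ item.2.2]])
      | some i => (st.1, st.2.modify i (fun l => l ++ [item.2.1 ++ "_" ++ item.2.2])))
    (PySem.Dict.empty, [])).2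

-- ===== PRECONDITION & SPEC =====
def Spec_timeseries_to_transactions (sensor_data : List (String × String × String)) (out : List (List String)) : Prop := out = timeseries_to_transactions_alt sensor_data
instance (sensor_data : List (String × String × String)) (out : List (List String)) : Decidable (Spec_timeseries_to_transactions sensor_data out) := by unfold Spec_timeseries_to_transactions; infer_instance

-- ===== CLAIM (what is proved, stated in full; the proofs are below) =====
def Claim_equal_timeseries_to_transactions : Prop := ∀ (sensor_data : List (String × String × String)), Dom_timeseries_to_transactions sensor_data → Spec_timeseries_to_transactions sensor_data (timeseries_to_transactions sensor_data)

-- ===== LEMMAS AND PROOFS =====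

-- the formatted measurement of an item
def pvFmt (it : String × String × String) : String := it.2.1 ++ "_" ++ it.2.2
-- the formatted group of a timestamp
def pvG (sd : List (String × String × String)) (ts : String) : List String :=
  (sd.filter (fun it => it.1 == ts)).map pvFmt
-- the distinct timestamps in first-appearance order
def pvK (sd : List (String × String × String)) : List String :=
  PySem.Set.ofList (sd.map (fun it => it.1))
-- B's loop step, named for the proofs (definitionally the fold body of the port)
def pvStepB (st : PySem.Dict String Nat × List (List String)) (item : String × String × String) :
    PySem.Dict String Nat × List (List String) :=
  match st.1.get? item.1 with
  | none => (st.1.insert item.1 st.2.length, st.2 ++ [[item.2.1 ++ "_" ++ item.2.2]])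
  | some i => (st.1, st.2.modify i (fun l => l ++ [item.2.1 ++ "_" ++ item.2.2]))

lemma pvB_eq_foldl (sd : List (String × String × String)) :
    timeseries_to_transactions_alt sd = (sd.foldl pvStepB (PySem.Dict.empty, [])).2 := rfl

lemma pvG_append (sd : List (String × String × String)) (x : String × String × String) (ts : String) :
    pvG (sd ++ [x]) ts = pvG sd ts ++ (if x.1 = ts then [pvFmt x] else []) := by
  simp only [pvG, List.filter_append, List.map_append]
  congr 1
  by_cases h : x.1 = ts <;> simp [h, pvFmt]

lemma pvIdxOf?_append_singleton (K : List String) (x ts : String) :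
    List.idxOf? ts (K ++ [x]) = ((List.idxOf? ts K).or (if x = ts then some K.length else none)) := by
  simp [List.idxOf?, List.findIdx?_append, List.findIdx?_singleton]

-- closed form of A
lemma pvA_closed_getD (l : List (String × String × String))
    (d : PySem.Dict String (List (String × String × String))) (c : String) :
    (l.foldl (fun g it => g.modify it.1 [] (fun v => v ++ [it])) d).getD c []
      = d.getD c [] ++ l.filter (fun it => it.1 == c) := by
  induction l generalizing d with
  | nil => simp
  | cons x l ih =>
    simp only [List.foldl_cons, ih, List.filter_cons]
    rw [PySem.Dict.getD_modify]
    by_cases h : c = x.1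
    · simp [h]
    · simp [h, Ne.symm h]

lemma pvA_closed (sd : List (String × String × String)) :
    timeseries_to_transactions sd = (pvK sd).map (pvG sd) := by
  unfold timeseries_to_transactions
  rw [PySem.List.foldl_append_singleton_eq_map, List.nil_append]
  rw [PySem.Dict.keys_foldl_modify_key sd (fun it => it.1) []
        (fun _ it => fun v => v ++ [it]) PySem.Dict.empty]
  apply List.map_congr_left
  intro ts _
  rw [PySem.List.foldl_append_singleton_eq_map, List.nil_append, pvA_closed_getD]
  simp [pvG, pvFmt, PySem.Dict.getD_empty]

-- B's loop invariant: the accumulated transactions are A's closed form on the prefix,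
-- and the dict maps each seen timestamp to its first-appearance position.
lemma pvB_inv (sd : List (String × String × String)) :
    (sd.foldl pvStepB (PySem.Dict.empty, [])).2 = (pvK sd).map (pvG sd)
    ∧ ∀ ts, (sd.foldl pvStepB (PySem.Dict.empty, [])).1.get? ts = List.idxOf? ts (pvK sd) := by
  induction sd using List.reverseRecOn with
  | nil => exact ⟨rfl, fun ts => by simp [pvK, PySem.Set.ofList_nil, PySem.Dict.get?_empty]⟩
  | append_singleton sd x ih =>
    obtain ⟨h2, h1⟩ := ih
    have hKnodup : (pvK sd).Nodup := PySem.Set.nodup_ofList _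
    rw [List.foldl_append, List.foldl_cons, List.foldl_nil]
    cases hx : (sd.foldl pvStepB (PySem.Dict.empty, [])).1.get? x.1 with
    | none =>
      have hmem : x.1 ∉ pvK sd := by
        rw [← List.idxOf?_eq_none_iff (l := pvK sd) (a := x.1), ← h1, hx]
      have hK : pvK (sd ++ [x]) = pvK sd ++ [x.1] := by
        simp only [pvK, List.map_append, List.map_cons, List.map_nil,
          PySem.Set.ofList_append_singleton]
        exact PySem.Set.add_of_not_mem hmem
      simp only [pvStepB, hx]
      constructor
      · rw [hK, List.map_append, List.map_singleton]
        congr 1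
        · rw [h2]
          apply List.map_congr_left
          intro ts hts
          rw [pvG_append, if_neg (fun (h : x.1 = ts) => hmem (h ▸ hts)), List.append_nil]
        · have hG : pvG sd x.1 = [] := by
            simp only [pvG, List.map_eq_nil_iff, List.filter_eq_nil_iff]
            intro it hit hbeq
            have hit1 : it.1 = x.1 := by simpa using hbeq
            exact absurd (by rw [pvK, PySem.Set.mem_ofList]
                             exact hit1 ▸ List.mem_map_of_mem hit) hmem
          rw [pvG_append, if_pos rfl, hG, List.nil_append]
          simp [pvFmt]
      · intro ts
        rw [hK, pvIdxOf?_append_singleton, PySem.Dict.get?_insert]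
        have hnone : List.idxOf? x.1 (pvK sd) = none := by rw [← h1, hx]
        by_cases h : ts = x.1
        · subst h
          rw [if_pos rfl, if_pos rfl, hnone, Option.none_or, h2, List.length_map]
        · rw [if_neg h, if_neg (fun hh => h hh.symm), Option.or_none, h1]
    | some i =>
      have hidx : List.idxOf? x.1 (pvK sd) = some i := by rw [← h1, hx]
      obtain ⟨hi, hKi, -⟩ := List.idxOf?_eq_some_iff.mp hidx
      have hmem : x.1 ∈ pvK sd := by rw [← hKi]; exact List.getElem_mem hi
      have hK : pvK (sd ++ [x]) = pvK sd := by
        simp only [pvK, List.map_append, List.map_cons, List.map_nil,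
          PySem.Set.ofList_append_singleton]
        exact PySem.Set.add_of_mem hmem
      simp only [pvStepB, hx]
      constructor
      · rw [hK, h2]
        apply List.ext_getElem (by simp)
        intro j hj hj'
        rw [List.getElem_modify]
        simp only [List.getElem_map]
        rw [pvG_append]
        have hjlen : j < (pvK sd).length := by simpa using hj'
        by_cases hij : i = j
        · subst hij
          rw [if_pos rfl, if_pos (by rw [hKi])]
          simp [pvFmt]
        · rw [if_neg hij, if_neg (fun h => hij ((hKnodup.getElem_inj_iff).mp (hKi.trans h))),
            List.append_nil]
      · intro ts; rw [hK, h1]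

-- ===== VERDICT (by name: the statement is the Claim_ definition above) =====
theorem timeseries_to_transactions_spec : Claim_equal_timeseries_to_transactions := by
  intro sd _
  unfold Spec_timeseries_to_transactions
  rw [pvA_closed, pvB_eq_foldl, (pvB_inv sd).1]
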